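-- pv_equiv track=rewrite | github.com/Mfkessler/CoExPlore | package/wgcna/ortho.py | get_common_hogs_per_level
-- ===== SOURCE A (Python) =====
-- from typing import List, Union, Dict, Tuple
--
-- def get_common_hogs_per_level(species_hog_levels: Dict[str, Dict[str, set]]) -> Dict[str, set]:
--     """
--     Identifies common HOGs per level from the species HOG levels dictionary.
--
--     Parameters:
--     - species_hog_levels (Dict[str, Dict[str, set]]): A dictionary where keys are species names and values are dictionaries
--                                 of HOG levels and their counts.
--
--     Returns:
--     - Dict[str, set]: A dictionary where keys are level names and values are sets of common HOGs.
--     """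
--
--     common_hogs_per_level = {}
--     levels = list(next(iter(species_hog_levels.values())).keys())
--
--     for level in levels:
--         common_hogs = set.intersection(
--             *(species_hog_levels[species][level] for species in species_hog_levels))
--         common_hogs_per_level[level] = common_hogs
--
--     return common_hogs_per_level
-- ===== SOURCE B (Python) =====
-- def _common_at(species_hog_levels, level, n):
--     counts = {}
--     for species in species_hog_levels:
--         for hog in species_hog_levels[species][level]:
--             counts[hog] = counts.get(hog, 0) + 1
--     return {hog for hog, c in counts.items() if c == n}
--
--
-- def get_common_hogs_per_level(species_hog_levels):
--     n = len(species_hog_levels)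
--     levels = next(iter(species_hog_levels.values())).keys()
--     return {level: _common_at(species_hog_levels, level, n) for level in levels}
-- ===== Notes on version B (the rewrite author's own statement) =====
-- stated objective: alternative
-- what changed: B replaces A's set.intersection(*...) across all species by a count-and-filter pass: it tallies each HOG's occurrences over the species' sets for a level and keeps the HOGs counted exactly len(species_hog_levels) times.
import Mathlib
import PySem

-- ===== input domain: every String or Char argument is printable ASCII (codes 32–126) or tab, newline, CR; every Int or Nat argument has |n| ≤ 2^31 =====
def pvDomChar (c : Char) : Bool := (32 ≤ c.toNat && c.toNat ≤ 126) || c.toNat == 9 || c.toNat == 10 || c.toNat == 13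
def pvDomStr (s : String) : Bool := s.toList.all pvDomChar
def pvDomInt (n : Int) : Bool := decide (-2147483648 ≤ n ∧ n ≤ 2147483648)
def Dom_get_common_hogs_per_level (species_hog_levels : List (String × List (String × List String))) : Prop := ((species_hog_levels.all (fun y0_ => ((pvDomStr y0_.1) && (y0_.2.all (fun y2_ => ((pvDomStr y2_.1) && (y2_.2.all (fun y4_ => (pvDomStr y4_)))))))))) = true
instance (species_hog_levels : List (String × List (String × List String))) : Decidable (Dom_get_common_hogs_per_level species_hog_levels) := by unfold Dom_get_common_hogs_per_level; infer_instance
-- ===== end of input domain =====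

-- B replaces A's set.intersection across all species by a count-and-filter pass
-- (tally each HOG across the species' sets, keep those tallied len(input) times);
-- objective: alternative decomposition, same asymptotic cost.

-- ===== PORT A =====
-- shared input decoding: the Python argument is a dict of dicts of sets;
-- both ports first rebuild it with Python's dict/set semantics (duplicate keys overwrite).
def pvInner (xs : List (String × List String)) : PySem.Dict String (PySem.Set String) :=
  PySem.Dict.ofList (xs.map (fun q => (q.1, PySem.Set.ofList q.2)))

def pvToDict (shl : List (String × List (String × List String))) :
    PySem.Dict String (PySem.Dict String (PySem.Set String)) :=
  PySem.Dict.ofList (shl.map (fun p => (p.1, pvInner p.2)))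

def get_common_hogs_per_level (species_hog_levels : List (String × List (String × List String))) :
    List (String × List String) :=
  let d := pvToDict species_hog_levels
  match d.values with
  | [] => []  -- Python raises StopIteration here; excluded by Pre_
  | v :: _ =>
    let levels := PySem.Dict.keys v
    (List.foldl (fun acc level =>
        -- set.intersection(*gen): first generated set, folded with the remaining ones.
        -- species_hog_levels[species][level] is getD-with-default: the raising case
        -- (KeyError on a missing level) is excluded by Pre_.
        let sets := List.map (fun species =>
          (d.getD species PySem.Dict.empty).getD level []) d.keys
        PySem.Dict.insert acc level
          (List.foldl PySem.Set.inter (sets.headD []) sets.tail))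
      PySem.Dict.empty levels).items

-- ===== PORT B =====
def pvCommonAt (d : PySem.Dict String (PySem.Dict String (PySem.Set String)))
    (level : String) (n : Int) : List String :=
  let counts :=
    List.foldl (fun c species =>
        List.foldl (fun c hog => PySem.Dict.insert c hog (c.getD hog 0 + 1)) c
          ((d.getD species PySem.Dict.empty).getD level []))  -- KeyError excluded by Pre_
      PySem.Dict.empty d.keys
  (List.filter (fun p => p.2 == n) counts.items).map (fun p => p.1)

def get_common_hogs_per_level_alt (species_hog_levels : List (String × List (String × List String))) :
    List (String × List String) :=
  let d := pvToDict species_hog_levels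
  let n : Int := d.size
  match d.values with
  | [] => []  -- Python raises StopIteration here; excluded by Pre_
  | v :: _ => (PySem.Dict.keys v).map (fun level => (level, pvCommonAt d level n))

-- ===== PRECONDITION & SPEC =====
-- Pre_ excludes exactly the inputs on which the Python A raises: the empty dict
-- (StopIteration on next(iter(...))) and inputs where some species' inner dict lacks
-- one of the first species' levels (KeyError on species_hog_levels[species][level]).
def Pre_get_common_hogs_per_level (species_hog_levels : List (String × List (String × List String))) : Prop :=
  species_hog_levels ≠ [] ∧
  ∀ v ∈ (pvToDict species_hog_levels).values,
    ∀ level ∈ ((pvToDict species_hog_levels).values.headD PySem.Dict.empty).keys,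
      v.contains level = true

instance (species_hog_levels : List (String × List (String × List String))) :
    Decidable (Pre_get_common_hogs_per_level species_hog_levels) := by
  unfold Pre_get_common_hogs_per_level; infer_instance

def pvWitness_get_common_hogs_per_level : (List (String × List (String × List String))) :=
  [("s1", [("l1", ["h1", "h2"])]), ("s2", [("l1", ["h2"])])]

def Spec_get_common_hogs_per_level (species_hog_levels : List (String × List (String × List String))) (out : List (String × List String)) : Prop := out = get_common_hogs_per_level_alt species_hog_levels
instance (species_hog_levels : List (String × List (String × List String))) (out : List (String × List String)) : Decidable (Spec_get_common_hogs_per_level species_hog_levels out) := by unfold Spec_get_common_hogs_per_level; infer_instance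

-- ===== CLAIM (what is proved, stated in full; the proofs are below) =====
def Claim_equal_get_common_hogs_per_level : Prop := ∀ (species_hog_levels : List (String × List (String × List String))), Dom_get_common_hogs_per_level species_hog_levels → Pre_get_common_hogs_per_level species_hog_levels → Spec_get_common_hogs_per_level species_hog_levels (get_common_hogs_per_level species_hog_levels)

-- ===== LEMMAS AND PROOFS =====

-- Any value of a dict built by a fold of inserts is an initial value or one of the inserted ones.
theorem pv_values_foldl_insert {κ ν : Type} [BEq κ] [LawfulBEq κ]
    (l : List (κ × ν)) (d : PySem.Dict κ ν) (w : ν)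
    (hw : w ∈ (List.foldl (fun acc p => acc.insert p.1 p.2) d l).values) :
    w ∈ d.values ∨ ∃ p ∈ l, w = p.2 := by
  induction l generalizing d with
  | nil => exact Or.inl hw
  | cons p rest ih =>
    rcases ih (d.insert p.1 p.2) hw with h | h
    · rcases PySem.Dict.mem_values_insert d p.1 p.2 w h with h | h
      · exact Or.inr ⟨p, List.mem_cons_self .., h⟩
      · exact Or.inl h
    · rcases h with ⟨q, hq, hqe⟩
      exact Or.inr ⟨q, List.mem_cons_of_mem _ hq, hqe⟩

theorem pv_values_ofList {κ ν : Type} [BEq κ] [LawfulBEq κ]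
    (l : List (κ × ν)) (w : ν) (hw : w ∈ (PySem.Dict.ofList l).values) :
    ∃ p ∈ l, w = p.2 := by
  rcases pv_values_foldl_insert l PySem.Dict.empty w hw with h | h
  · simp [PySem.Dict.values, PySem.Dict.empty] at h
  · exact h

-- every set stored (or defaulted) at any level of any species of the decoded input is duplicate-free
theorem pv_inner_getD_nodup (shl : List (String × List (String × List String)))
    (v : PySem.Dict String (PySem.Set String)) (hv : v ∈ (pvToDict shl).values) (k : String) :
    (v.getD k []).Nodup := by
  rcases pv_values_ofList _ v hv with ⟨p, hp, rfl⟩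
  rcases List.mem_map.mp hp with ⟨q, _, rfl⟩
  rw [PySem.Dict.getD_eq_get?_getD]
  cases hg : (pvInner q.2).get? k with
  | none => simp
  | some w =>
    have hmem : w ∈ (pvInner q.2).values := by
      have := PySem.Dict.mem_items_of_get?_eq_some _ hg
      simp only [PySem.Dict.values]
      exact List.mem_map_of_mem this
    rcases pv_values_ofList _ w hmem with ⟨r, hr, rfl⟩
    rcases List.mem_map.mp hr with ⟨u, _, rfl⟩
    exact PySem.Set.nodup_ofList u.2

theorem pv_getD_mem_values {κ ν : Type} [BEq κ] [LawfulBEq κ]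
    (d : PySem.Dict κ ν) (k : κ) (d0 : ν) (hnd : d.keys.Nodup) (hk : k ∈ d.keys) :
    d.getD k d0 ∈ d.values := by
  simp only [PySem.Dict.keys] at hk
  obtain ⟨⟨k1, v1⟩, hp, rfl⟩ := List.mem_map.mp hk
  rw [PySem.Dict.getD_of_mem_items d hp hnd]
  exact List.mem_map_of_mem hp

-- A's per-level loop: folding set-intersection filters the first set
theorem pv_foldl_inter {α : Type} [BEq α]
    (ss : List (PySem.Set α)) (s : PySem.Set α) :
    List.foldl PySem.Set.inter s ss
      = List.filter (fun x => ss.all (fun t => PySem.Set.contains t x)) s := by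
  induction ss generalizing s with
  | nil => simp
  | cons t rest ih =>
    simp only [List.foldl_cons, ih, PySem.Set.inter, List.filter_filter, List.all_cons]
    exact List.filter_congr (by intro x _; rw [Bool.and_comm])

-- counting an element across a flatten of duplicate-free lists
theorem pv_count_flatten_le {α : Type} [BEq α] [LawfulBEq α]
    (ts : List (List α)) (hnd : ∀ t ∈ ts, t.Nodup) (x : α) :
    ts.flatten.count x ≤ ts.length := by
  induction ts with
  | nil => simp
  | cons t rest ih =>
    simp only [List.flatten_cons, List.count_append, List.length_cons]
    have h1 : t.count x ≤ 1 :=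
      List.nodup_iff_count_le_one.mp (hnd t (List.mem_cons_self ..)) x
    have h2 := ih (fun u hu => hnd u (List.mem_cons_of_mem _ hu))
    omega

theorem pv_count_flatten_eq_iff {α : Type} [BEq α] [LawfulBEq α]
    (ts : List (List α)) (hnd : ∀ t ∈ ts, t.Nodup) (x : α) :
    ts.flatten.count x = ts.length ↔ ∀ t ∈ ts, x ∈ t := by
  induction ts with
  | nil => simp
  | cons t rest ih =>
    simp only [List.flatten_cons, List.count_append, List.length_cons, List.mem_cons]
    have h1 : t.count x ≤ 1 :=
      List.nodup_iff_count_le_one.mp (hnd t (List.mem_cons_self ..)) x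
    have h2 := pv_count_flatten_le rest (fun u hu => hnd u (List.mem_cons_of_mem _ hu)) x
    have h3 := ih (fun u hu => hnd u (List.mem_cons_of_mem _ hu))
    constructor
    · intro h
      have hx1 : t.count x = 1 := by omega
      have hx2 : rest.flatten.count x = rest.length := by omega
      exact fun u hu => hu.elim (fun h => h ▸ List.count_pos_iff.mp (by omega))
        (fun h => h3.mp hx2 u h)
    · intro h
      have hx1 : t.count x = 1 :=
        List.count_eq_one_of_mem (hnd t (List.mem_cons_self ..)) (h t (Or.inl rfl))
      have hx2 : rest.flatten.count x = rest.length :=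
        h3.mpr (fun u hu => h u (Or.inr hu))
      omega

-- the count-and-filter value equals the intersection value
theorem pv_count_filter_eq_inter (s : PySem.Set String) (rest : List (PySem.Set String))
    (hs : s.Nodup) (hrest : ∀ t ∈ rest, t.Nodup) (n : Int) (hn : n = 1 + rest.length) :
    List.map (fun p => p.1)
        (List.filter (fun p => p.2 == n)
          (List.map (fun k => (k, ((s ++ rest.flatten).count k : Int))) (PySem.Set.ofList (s ++ rest.flatten))))
      = List.filter (fun x => rest.all (fun t => PySem.Set.contains t x)) s := by
  rw [List.filter_map, List.map_map]
  rw [show ((fun p : String × Int => p.1) ∘ (fun k => (k, ((s ++ rest.flatten).count k : Int)))) = id from rfl,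
    List.map_id]
  rw [show ((fun p : String × Int => p.2 == n) ∘ (fun k => (k, ((s ++ rest.flatten).count k : Int))))
      = fun k => (((s ++ rest.flatten).count k : Int) == n) from rfl]
  -- split ofList (s ++ R) into s and the genuinely new elements
  rw [PySem.Set.ofList_append, PySem.Set.ofList_eq_self_of_nodup s hs,
    PySem.Set.update_eq_append_filter, List.filter_append]
  have hRle := pv_count_flatten_le rest hrest
  have hRiff := pv_count_flatten_eq_iff rest hrest
  have hnew : List.filter (fun k => (((s ++ rest.flatten).count k : Int) == n))
      (List.filter (fun y => !PySem.Set.contains s y) (PySem.Set.ofList rest.flatten)) = [] := by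
    rw [List.filter_eq_nil_iff]
    intro x hx
    have hxs : x ∉ s := by
      have h := (List.mem_filter.mp hx).2
      intro hmem
      rw [(PySem.Set.contains_iff s x).mpr hmem] at h
      simp at h
    have hc : (s ++ rest.flatten).count x ≤ rest.length := by
      rw [List.count_append, List.count_eq_zero_of_not_mem hxs]
      simpa using hRle x
    simp only [beq_iff_eq, hn]
    intro habs
    have : (s ++ rest.flatten).count x = 1 + rest.length := by exact_mod_cast habs
    omega
  rw [hnew, List.append_nil]
  refine List.filter_congr ?_
  intro x hxs
  have hcx : (s ++ rest.flatten).count x = 1 + rest.flatten.count x := by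
    rw [List.count_append, List.count_eq_one_of_mem hs hxs]
  by_cases hall : ∀ t ∈ rest, x ∈ t
  · have h1 : rest.flatten.count x = rest.length := (hRiff x).mpr hall
    have h2 : rest.all (fun t => PySem.Set.contains t x) = true := by
      rw [List.all_eq_true]
      exact fun t ht => (PySem.Set.contains_iff t x).mpr (hall t ht)
    rw [h2]
    simp only [beq_iff_eq, hn, hcx, h1]
    push_cast
    omega
  · have h1 : rest.flatten.count x ≠ rest.length := fun h => hall ((hRiff x).mp h)
    have h2 : rest.all (fun t => PySem.Set.contains t x) = false := by
      rw [Bool.eq_false_iff]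
      intro habs
      exact hall (fun t ht => (PySem.Set.contains_iff t x).mp ((List.all_eq_true.mp habs) t ht))
    rw [h2]
    have h3 := hRle x
    simp only [beq_eq_false_iff_ne, ne_eq, hn, hcx]
    intro habs
    have : 1 + rest.flatten.count x = 1 + rest.length := by exact_mod_cast habs
    omega

-- B's counter loop, characterised: its items are the distinct elements with their counts
theorem pv_counts_items (L : List String) :
    (List.foldl (fun c hog => PySem.Dict.insert c hog (c.getD hog 0 + 1))
        (PySem.Dict.empty : PySem.Dict String Int) L).items
      = List.map (fun k => (k, (L.count k : Int))) (PySem.Set.ofList L) := by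
  have hkeys : (List.foldl (fun c hog => PySem.Dict.insert c hog (c.getD hog 0 + 1))
      (PySem.Dict.empty : PySem.Dict String Int) L).keys = PySem.Set.ofList L := by
    rw [PySem.Dict.keys_foldl_insert L (fun c hog => c.getD hog 0 + 1) PySem.Dict.empty]
    rw [PySem.Dict.keys_empty, PySem.Set.update_nil_left]
  have hnd : (List.foldl (fun c hog => PySem.Dict.insert c hog (c.getD hog 0 + 1))
      (PySem.Dict.empty : PySem.Dict String Int) L).keys.Nodup := by
    refine PySem.Dict.nodup_keys_foldl_insert L _ _ ?_
    rw [PySem.Dict.keys_empty]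
    exact List.nodup_nil
  rw [PySem.Dict.items_eq_map_keys _ hnd 0, hkeys]
  refine List.map_congr_left ?_
  intro k _
  rw [PySem.Dict.getD_foldl_insert_add_one L PySem.Dict.empty k, PySem.Dict.getD_empty, zero_add]

-- dicts built by inserting something for every pair of a nonempty list are nonempty
theorem pv_size_le_foldl_insert {κ ν : Type} [BEq κ]
    (l : List (κ × ν)) (d : PySem.Dict κ ν) :
    d.size ≤ (List.foldl (fun acc p => acc.insert p.1 p.2) d l).size := by
  induction l generalizing d with
  | nil => simp
  | cons p rest ih =>
    refine le_trans ?_ (ih (d.insert p.1 p.2))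
    rw [PySem.Dict.size_insert]
    split <;> omega

theorem pv_ofList_items_ne_nil {κ ν : Type} [BEq κ]
    (l : List (κ × ν)) (hl : l ≠ []) : (PySem.Dict.ofList l).items ≠ [] := by
  cases l with
  | nil => exact absurd rfl hl
  | cons p rest =>
    have h := pv_size_le_foldl_insert rest (PySem.Dict.empty.insert p.1 p.2)
    have h2 : (PySem.Dict.empty.insert p.1 p.2).size = 1 := by
      rw [PySem.Dict.size_insert]
      simp [PySem.Dict.contains_empty, PySem.Dict.size_empty]
    intro habs
    have h3 : (PySem.Dict.ofList (p :: rest)).size = 0 := by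
      simp [PySem.Dict.size, habs]
    simp only [PySem.Dict.ofList, PySem.Dict.update, List.foldl_cons] at h3
    omega

-- ===== VERDICT (by name: the statement is the Claim_ definition above) =====
theorem get_common_hogs_per_level_spec : Claim_equal_get_common_hogs_per_level := by
  intro shl _ hpre
  unfold Spec_get_common_hogs_per_level
  unfold get_common_hogs_per_level get_common_hogs_per_level_alt
  rcases hpre with ⟨hne, _hlv⟩
  set d := pvToDict shl with hd
  have hitems : d.items ≠ [] :=
    pv_ofList_items_ne_nil _ (fun h => hne (List.map_eq_nil_iff.mp h))
  have hndk : d.keys.Nodup := PySem.Dict.nodup_keys_ofList _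
  have hkne : d.keys ≠ [] := by
    simp only [PySem.Dict.keys]
    intro h
    exact hitems (List.map_eq_nil_iff.mp h)
  obtain ⟨v, vs, hvals⟩ : ∃ v vs, d.values = v :: vs := by
    cases h : d.values with
    | nil =>
      exact absurd (by simpa [PySem.Dict.values] using h) hitems
    | cons a l => exact ⟨a, l, rfl⟩
  obtain ⟨k0, krest, hkeys⟩ : ∃ a l, d.keys = a :: l := by
    cases h : d.keys with
    | nil => exact absurd h hkne
    | cons a l => exact ⟨a, l, rfl⟩
  simp only [hvals]
  -- reduce A's fold to a map over the levels
  have hA : (List.foldl (fun acc level =>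
      let sets := List.map (fun species =>
        (d.getD species PySem.Dict.empty).getD level []) d.keys
      PySem.Dict.insert acc level
        (List.foldl PySem.Set.inter (sets.headD []) sets.tail))
      PySem.Dict.empty (PySem.Dict.keys v)).items
      = List.map (fun level => (level,
          List.foldl PySem.Set.inter
            ((d.getD k0 PySem.Dict.empty).getD level [])
            (List.map (fun species => (d.getD species PySem.Dict.empty).getD level []) krest)))
        (PySem.Dict.keys v) := by
    have hbody : ∀ (acc : PySem.Dict String (PySem.Set String)), ∀ level ∈ PySem.Dict.keys v,
        (let sets := List.map (fun species =>
            (d.getD species PySem.Dict.empty).getD level []) d.keys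
         PySem.Dict.insert acc level
          (List.foldl PySem.Set.inter (sets.headD []) sets.tail))
        = PySem.Dict.insert acc level
            (List.foldl PySem.Set.inter
              ((d.getD k0 PySem.Dict.empty).getD level [])
              (List.map (fun species => (d.getD species PySem.Dict.empty).getD level []) krest)) := by
      intro acc level _
      rw [hkeys]
      simp [List.map_cons]
    rw [PySem.List.foldl_congr_mem _ _
      (fun acc level => PySem.Dict.insert acc level
        (List.foldl PySem.Set.inter
          ((d.getD k0 PySem.Dict.empty).getD level [])
          (List.map (fun species => (d.getD species PySem.Dict.empty).getD level []) krest)))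
      _ (fun acc x hx => hbody acc x hx)]
    have hvnd : (PySem.Dict.keys v).Nodup := by
      have hv : v ∈ d.values := by rw [hvals]; exact List.mem_cons_self ..
      rcases pv_values_ofList _ v hv with ⟨p, hp, rfl⟩
      rcases List.mem_map.mp hp with ⟨q, _, rfl⟩
      exact PySem.Dict.nodup_keys_ofList _
    have hfresh := PySem.Dict.items_foldl_insert_fresh (PySem.Dict.keys v) (fun l => l)
      (fun level => List.foldl PySem.Set.inter
        ((d.getD k0 PySem.Dict.empty).getD level [])
        (List.map (fun species => (d.getD species PySem.Dict.empty).getD level []) krest))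
      PySem.Dict.empty (fun a _ => PySem.Dict.contains_empty a) (by simpa using hvnd)
    simpa using hfresh
  rw [hA]
  refine List.map_congr_left ?_
  intro level _
  refine congrArg (fun w => (level, w)) ?_
  -- per-level equality
  have hnodupf : ∀ species ∈ d.keys, ((d.getD species PySem.Dict.empty).getD level []).Nodup := by
    intro sp hsp
    exact pv_inner_getD_nodup shl _ (pv_getD_mem_values d sp PySem.Dict.empty hndk hsp) level
  have hs : ((d.getD k0 PySem.Dict.empty).getD level []).Nodup :=
    hnodupf k0 (by rw [hkeys]; exact List.mem_cons_self ..)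
  have hrest : ∀ t ∈ List.map (fun species => (d.getD species PySem.Dict.empty).getD level []) krest,
      t.Nodup := by
    intro t ht
    rcases List.mem_map.mp ht with ⟨sp, hsp, rfl⟩
    exact hnodupf sp (by rw [hkeys]; exact List.mem_cons_of_mem _ hsp)
  -- unfold B's per-level computation
  unfold pvCommonAt
  rw [show (List.foldl (fun c species =>
        List.foldl (fun c hog => PySem.Dict.insert c hog (c.getD hog 0 + 1)) c
          ((d.getD species PySem.Dict.empty).getD level []))
        (PySem.Dict.empty : PySem.Dict String Int) d.keys)
      = List.foldl (fun c hog => PySem.Dict.insert c hog (c.getD hog 0 + 1))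
          (PySem.Dict.empty : PySem.Dict String Int)
          (List.map (fun species => (d.getD species PySem.Dict.empty).getD level []) d.keys).flatten by
    rw [List.foldl_flatten, List.foldl_map]]
  show _ = List.map (fun p => p.1) (List.filter (fun p => p.2 == (d.size : Int))
    (List.foldl (fun c hog => PySem.Dict.insert c hog (c.getD hog 0 + 1))
      (PySem.Dict.empty : PySem.Dict String Int)
      (List.map (fun species => (d.getD species PySem.Dict.empty).getD level []) d.keys).flatten).items)
  rw [pv_counts_items]
  have hsize : (d.size : Int) = 1 + (List.map (fun species =>
      (d.getD species PySem.Dict.empty).getD level []) krest).length := by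
    have hsz : d.size = d.keys.length := by
      simp [PySem.Dict.size, PySem.Dict.keys]
    rw [hsz, hkeys]
    simp only [List.length_cons, List.length_map]
    push_cast
    omega
  rw [hkeys, List.map_cons, List.flatten_cons]
  rw [pv_count_filter_eq_inter _ _ hs hrest _ hsize]
  rw [pv_foldl_inter]
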